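-- pv_equiv track=rewrite | github.com/emiconpar/envdiff | envdiff/sorter.py | sort_env_by_prefix
-- ===== SOURCE A (Python) =====
-- from typing import Dict, List, Optional
--
-- def sort_env_by_prefix(
--     env: Dict[str, str],
--     prefixes: List[str],
-- ) -> Dict[str, str]:
--     """Return a new dict with keys grouped by prefix order, remainder appended.
--
--     Keys matching the first prefix come first, then the second, and so on.
--     Keys not matching any prefix are appended at the end, sorted alphabetically.
--     """
--
--     def _priority(key: str) -> int:
--         for idx, prefix in enumerate(prefixes):
--             if key.startswith(prefix):
--                 return idx
--         return len(prefixes)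
--
--     return dict(
--         sorted(env.items(), key=lambda kv: (_priority(kv[0]), kv[0]))
--     )
-- ===== SOURCE B (Python) =====
-- def sort_env_by_prefix(env, prefixes):
--     """Sort keys alphabetically once, then distribute them over prefix
--     buckets with one stable partition pass per prefix; remainder last."""
--     remaining = sorted(env)
--     ordered = []
--     for prefix in prefixes:
--         ordered += [k for k in remaining if k.startswith(prefix)]
--         remaining = [k for k in remaining if not k.startswith(prefix)]
--     ordered += remaining
--     return {k: env[k] for k in ordered}
-- ===== Notes on version B (the rewrite author's own statement) =====
-- stated objective: alternative
-- what changed: Replaces the single composite-key sort (priority, key) by one plain alphabetical sort of the keys followed by a stable partition pass per prefix (bucket distribution), concatenating buckets in prefix order with the remainder last; Pre_ excludes only association lists with duplicate keys, which do not represent any Python dict input.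
import Mathlib
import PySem

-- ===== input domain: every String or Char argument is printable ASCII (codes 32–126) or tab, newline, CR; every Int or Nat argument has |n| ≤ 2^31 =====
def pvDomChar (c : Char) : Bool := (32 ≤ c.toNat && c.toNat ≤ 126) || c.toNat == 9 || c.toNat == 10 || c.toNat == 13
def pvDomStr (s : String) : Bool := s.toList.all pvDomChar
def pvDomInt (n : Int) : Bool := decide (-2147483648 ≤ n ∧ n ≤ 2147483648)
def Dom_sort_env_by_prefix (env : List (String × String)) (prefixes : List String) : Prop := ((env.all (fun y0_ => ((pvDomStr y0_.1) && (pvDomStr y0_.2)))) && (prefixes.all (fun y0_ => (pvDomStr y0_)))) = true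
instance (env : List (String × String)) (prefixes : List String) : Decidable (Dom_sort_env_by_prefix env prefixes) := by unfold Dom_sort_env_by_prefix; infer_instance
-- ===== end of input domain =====

-- B replaces A's single composite-key (priority, key) sort by one alphabetical key sort
-- followed by a stable partition pass per prefix; return value only, neither mutates input.

-- ===== PORT A =====
-- inner loop of `_priority`: `for idx, prefix in enumerate(prefixes): if key.startswith(prefix): return idx`;
-- the accumulator counts the consumed prefixes, so the fall-through value equals len(prefixes)
def pvPriorityGo (key : String) : List String → Int → Int
  | [], n => n
  | p :: ps, n => if PySem.Str.startswith key p then n else pvPriorityGo key ps (n + 1)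

def pvPriority (prefixes : List String) (key : String) : Int :=
  pvPriorityGo key prefixes 0

def sort_env_by_prefix (env : List (String × String)) (prefixes : List String) : List (String × String) :=
  (PySem.Dict.ofList
    (PySem.List.sorted2 env (fun kv => pvPriority prefixes kv.1) (fun kv => kv.1))).items

-- ===== PORT B =====
def sort_env_by_prefix_alt (env : List (String × String)) (prefixes : List String) : List (String × String) :=
  let envd := PySem.Dict.mk env
  let remaining := PySem.List.sorted envd.keys (fun k => k)
  let st := prefixes.foldl
    (fun st prefix_ =>
      (st.1 ++ st.2.filter (fun k => PySem.Str.startswith k prefix_),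
       st.2.filter (fun k => !PySem.Str.startswith k prefix_)))
    (([] : List String), remaining)
  let ordered := st.1 ++ st.2
  -- `{k: env[k] for k in ordered}`: every k of ordered is a key of env, so `env[k]` never
  -- raises; the "" default of getD is unreachable
  (ordered.foldl (fun d k => d.insert k (envd.getD k "")) PySem.Dict.empty).items

-- ===== PRECONDITION & SPEC =====
-- Pre_ excludes only association lists with duplicate keys: a Python dict cannot hold
-- duplicate keys, so such lists do not represent any input A accepts.
def Pre_sort_env_by_prefix (env : List (String × String)) (prefixes : List String) : Prop :=
  (env.map (fun kv => kv.1)).Nodup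

instance (env : List (String × String)) (prefixes : List String) : Decidable (Pre_sort_env_by_prefix env prefixes) := by unfold Pre_sort_env_by_prefix; infer_instance

def pvWitness_sort_env_by_prefix : (List (String × String)) × List String :=
  ([("PATH", "/bin"), ("APP_MODE", "dev"), ("HOME", "/root")], ["APP_", "HO"])

def Spec_sort_env_by_prefix (env : List (String × String)) (prefixes : List String) (out : List (String × String)) : Prop := out = sort_env_by_prefix_alt env prefixes
instance (env : List (String × String)) (prefixes : List String) (out : List (String × String)) : Decidable (Spec_sort_env_by_prefix env prefixes out) := by unfold Spec_sort_env_by_prefix; infer_instance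

-- ===== CLAIM (what is proved, stated in full; the proofs are below) =====
def Claim_equal_sort_env_by_prefix : Prop := ∀ (env : List (String × String)) (prefixes : List String), Dom_sort_env_by_prefix env prefixes → Pre_sort_env_by_prefix env prefixes → Spec_sort_env_by_prefix env prefixes (sort_env_by_prefix env prefixes)

-- ===== LEMMAS AND PROOFS =====

-- proof-side recursive description of B's prefix loop
def pvDist : List String → List String → List String
  | ks, [] => ks
  | ks, p :: ps =>
      ks.filter (fun k => PySem.Str.startswith k p)
        ++ pvDist (ks.filter (fun k => !PySem.Str.startswith k p)) ps

theorem pvPriorityGo_shift (key : String) (ps : List String) (n : Int) :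
    pvPriorityGo key ps n = n + pvPriorityGo key ps 0 := by
  induction ps generalizing n with
  | nil => simp [pvPriorityGo]
  | cons p ps ih =>
    simp only [pvPriorityGo]
    split
    · simp
    · rw [ih (n + 1), ih (0 + 1)]; ring

theorem pvPriorityGo_nonneg (key : String) (ps : List String) :
    0 ≤ pvPriorityGo key ps 0 := by
  induction ps with
  | nil => simp [pvPriorityGo]
  | cons p ps ih =>
    simp only [pvPriorityGo]
    split
    · exact le_refl 0
    · rw [pvPriorityGo_shift]; omega

theorem pvPriority_cons_pos (key p : String) (ps : List String)
    (h : PySem.Str.startswith key p = true) : pvPriority (p :: ps) key = 0 := by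
  have h' : PySem.Chars.startswith key.toList p.toList = true := by simpa using h
  simp [pvPriority, pvPriorityGo, h']

theorem pvPriority_cons_neg (key p : String) (ps : List String)
    (h : PySem.Str.startswith key p = false) :
    pvPriority (p :: ps) key = 1 + pvPriority ps key := by
  have h' : PySem.Chars.startswith key.toList p.toList = false := by simpa using h
  simp only [pvPriority, pvPriorityGo]
  rw [if_neg (by simp [h']), pvPriorityGo_shift key ps (0 + 1)]
  ring

theorem pvDist_perm (ks ps : List String) : (pvDist ks ps).Perm ks := by
  induction ps generalizing ks with
  | nil => simp [pvDist]
  | cons p ps ih =>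
    simp only [pvDist]
    exact ((List.Perm.append_left _ (ih _)).trans
      (List.filter_append_perm (fun k => PySem.Str.startswith k p) ks))

theorem mem_pvDist (ks ps : List String) {x : String} (h : x ∈ pvDist ks ps) : x ∈ ks :=
  (pvDist_perm ks ps).mem_iff.mp h

theorem pvDist_pairwise (ps ks : List String) (h : ks.Pairwise (· < ·)) :
    (pvDist ks ps).Pairwise
      (fun a b => pvPriority ps a < pvPriority ps b ∨
        (pvPriority ps a = pvPriority ps b ∧ a < b)) := by
  induction ps generalizing ks with
  | nil =>
    exact (h.imp (fun hab => Or.inr ⟨rfl, hab⟩))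
  | cons p ps ih =>
    simp only [pvDist]
    rw [List.pairwise_append]
    refine ⟨?_, ?_, ?_⟩
    · -- inside the bucket of p: both priorities are 0
      refine (h.filter _).imp_of_mem ?_
      intro a b ha hb hab
      have hsa := (List.mem_filter.mp ha).2
      have hsb := (List.mem_filter.mp hb).2
      exact Or.inr ⟨by rw [pvPriority_cons_pos _ _ _ hsa, pvPriority_cons_pos _ _ _ hsb], hab⟩
    · -- inside the recursive tail: shift priorities by one
      refine (ih _ (h.filter _)).imp_of_mem ?_
      intro a b ha hb hab
      have hsa := (List.mem_filter.mp (mem_pvDist _ _ ha)).2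
      have hsb := (List.mem_filter.mp (mem_pvDist _ _ hb)).2
      rw [Bool.not_eq_eq_eq_not, Bool.not_true] at hsa hsb
      rw [pvPriority_cons_neg _ _ _ hsa, pvPriority_cons_neg _ _ _ hsb]
      rcases hab with h1 | ⟨h1, h2⟩
      · exact Or.inl (by omega)
      · exact Or.inr ⟨by omega, h2⟩
    · -- bucket of p comes before everything that does not start with p
      intro a ha b hb
      have hsa := (List.mem_filter.mp ha).2
      have hsb := (List.mem_filter.mp (mem_pvDist _ _ hb)).2
      rw [Bool.not_eq_eq_eq_not, Bool.not_true] at hsb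
      rw [pvPriority_cons_pos _ _ _ hsa, pvPriority_cons_neg _ _ _ hsb]
      have := pvPriorityGo_nonneg b ps
      exact Or.inl (by simp only [pvPriority] at *; omega)

-- B's foldl over the prefixes computes exactly pvDist of the remaining keys
theorem pvFoldl_dist (ps : List String) (res rem : List String) :
    (ps.foldl
      (fun st p =>
        (st.1 ++ st.2.filter (fun k => PySem.Str.startswith k p),
         st.2.filter (fun k => !PySem.Str.startswith k p)))
      (res, rem)).1
    ++ (ps.foldl
      (fun st p =>
        (st.1 ++ st.2.filter (fun k => PySem.Str.startswith k p),
         st.2.filter (fun k => !PySem.Str.startswith k p)))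
      (res, rem)).2
    = res ++ pvDist rem ps := by
  induction ps generalizing res rem with
  | nil => simp [pvDist]
  | cons p ps ih =>
    simp only [List.foldl_cons, pvDist]
    rw [ih, List.append_assoc]

-- Python's tuple key (int, str) is the lexicographic order
theorem sorted2_eq_sorted_lex {α : Type} (xs : List α) (k1 : α → Int) (k2 : α → String) :
    PySem.List.sorted2 xs k1 k2 = PySem.List.sorted xs (fun x => toLex (k1 x, k2 x)) := by
  have hbe : (fun (a b : α) => decide (k1 a < k1 b) || (!decide (k1 b < k1 a) && decide (k2 a < k2 b)))
      = fun a b => decide (toLex (k1 a, k2 a) < toLex (k1 b, k2 b)) := by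
    funext a b
    rcases lt_trichotomy (k1 a) (k1 b) with h | h | h
    · simp [Prod.Lex.lt_iff, h]
    · simp [Prod.Lex.lt_iff, h]
    · have h1 : ¬ k1 a < k1 b := not_lt_of_gt h
      simp [Prod.Lex.lt_iff, h.ne', h1, not_le_of_gt h]
  show List.foldl (fun acc x => PySem.List.insertBy
      (fun a b => decide (k1 a < k1 b) || (!decide (k1 b < k1 a) && decide (k2 a < k2 b))) x acc) [] xs = _
  rw [PySem.List.sorted_eq_foldl_insertBy, hbe]

theorem alt_unfold (env : List (String × String)) (prefixes : List String) :
    sort_env_by_prefix_alt env prefixes =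
      (((prefixes.foldl
          (fun st p =>
            (st.1 ++ st.2.filter (fun k => PySem.Str.startswith k p),
             st.2.filter (fun k => !PySem.Str.startswith k p)))
          (([] : List String), PySem.List.sorted (PySem.Dict.mk env).keys (fun k => k))).1
        ++ (prefixes.foldl
          (fun st p =>
            (st.1 ++ st.2.filter (fun k => PySem.Str.startswith k p),
             st.2.filter (fun k => !PySem.Str.startswith k p)))
          (([] : List String), PySem.List.sorted (PySem.Dict.mk env).keys (fun k => k))).2).foldl
          (fun d k => d.insert k ((PySem.Dict.mk env).getD k "")) PySem.Dict.empty).items := rfl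

theorem sort_env_by_prefix_spec : Claim_equal_sort_env_by_prefix := by
  intro env prefixes _ hpre
  unfold Spec_sort_env_by_prefix sort_env_by_prefix
  rw [alt_unfold]
  have hpre' : (env.map (fun kv => kv.1)).Nodup := hpre
  set envd : PySem.Dict String String := PySem.Dict.mk env with henvd
  have hkeys : envd.keys = env.map (fun kv => kv.1) := PySem.Dict.keys_mk env
  have hknd : envd.keys.Nodup := by rw [hkeys]; exact hpre'
  -- B's sorted key list
  set ks := PySem.List.sorted envd.keys (fun k => k) with hks
  have hksperm : ks.Perm envd.keys := PySem.List.sorted_perm _ _ _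
  have hksnd : ks.Nodup := hksperm.nodup_iff.mpr hknd
  have hkslt : ks.Pairwise (· < ·) := by
    have h1 : ks.Pairwise (· ≤ ·) := PySem.List.sorted_pairwise envd.keys (fun k => k)
    have h2 : ks.Pairwise (· ≠ ·) := hksnd
    exact (h1.and h2).imp (fun ⟨hle, hne⟩ => lt_of_le_of_ne hle hne)
  -- B's ordered key list is pvDist ks prefixes
  rw [pvFoldl_dist]
  simp only [List.nil_append]
  set ordered := pvDist ks prefixes with hord
  have hordperm : ordered.Perm ks := pvDist_perm ks prefixes
  have hordnd : ordered.Nodup := hordperm.nodup_iff.mpr hksnd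
  -- B's dict-comprehension foldl appends fresh keys
  have hB : (ordered.foldl (fun d k => d.insert k (envd.getD k "")) PySem.Dict.empty).items
      = ordered.map (fun k => (k, envd.getD k "")) := by
    have := PySem.Dict.items_foldl_insert_fresh (l := ordered) (k := fun k => k)
      (v := fun k => envd.getD k "") (d := PySem.Dict.empty)
      (by intro a _; exact PySem.Dict.contains_empty a) (by simpa using hordnd)
    simpa using this
  rw [hB]
  -- A's sorted2 is sorted with the lexicographic (priority, key) key
  rw [sorted2_eq_sorted_lex]
  -- name the sorted order: B's list is a strictly increasing rearrangement of env
  have hperm : (ordered.map (fun k => (k, envd.getD k ""))).Perm env := by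
    have h1 : (ordered.map (fun k => (k, envd.getD k ""))).Perm
        (envd.keys.map (fun k => (k, envd.getD k ""))) :=
      (hordperm.trans hksperm).map _
    have h2 : envd.keys.map (fun k => (k, envd.getD k "")) = env := by
      rw [← PySem.Dict.items_eq_map_keys envd hknd ""]
    exact h2 ▸ h1
  have hpw : (ordered.map (fun k => (k, envd.getD k ""))).Pairwise
      (fun a b => (fun kv : String × String => toLex (pvPriority prefixes kv.1, kv.1)) a
        < (fun kv : String × String => toLex (pvPriority prefixes kv.1, kv.1)) b) := by
    rw [List.pairwise_map]
    refine (pvDist_pairwise prefixes ks hkslt).imp ?_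
    intro a b hab
    rw [Prod.Lex.lt_iff]
    exact hab
  have := PySem.List.sorted_eq_of_perm_of_pairwise_lt env
    (ordered.map (fun k => (k, envd.getD k ""))) _ hperm hpw
  rw [this]
  -- A's dict() of a nodup-key list keeps the list as its items
  have hAnd : ((ordered.map (fun k => (k, envd.getD k ""))).map (fun kv => kv.1)).Nodup := by
    have hmm : ((ordered.map (fun k => (k, envd.getD k ""))).map (fun kv => kv.1)) = ordered := by
      clear hordperm hordnd hord
      induction ordered with
      | nil => rfl
      | cons x t iht => simp [iht]
    rw [hmm]
    exact hordnd
  have hA := PySem.Dict.items_foldl_insert_fresh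
    (l := ordered.map (fun k => (k, envd.getD k ""))) (k := fun p => p.1) (v := fun p => p.2)
    (d := PySem.Dict.empty)
    (by intro a _; exact PySem.Dict.contains_empty a.1) hAnd
  show (PySem.Dict.empty.update _).items = _
  unfold PySem.Dict.update
  rw [hA]
  simp [Function.comp, PySem.Dict.empty]
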